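-- pv_equiv track=rewrite | github.com/Charvey10/fathom-webhook | app.py | to_cc_split
-- ===== SOURCE A (Python) =====
-- def to_cc_split(external, talk_ratio, absent):
--     if len(external) <= 3:
--         return [(a["name"], a["email"]) for a in external], []
--     to_names = set()
--     for a in absent: to_names.add(a["name"])
--     ranked = sorted(external, key=lambda a: talk_ratio.get(a["name"], {}).get("words", 0), reverse=True)
--     for a in ranked[:2]: to_names.add(a["name"])
--     to_list = [(a["name"], a["email"]) for a in external if a["name"] in to_names]
--     cc_list = [(a["name"], a["email"]) for a in external if a["name"] not in to_names]
--     return to_list, cc_list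
-- ===== SOURCE B (Python) =====
-- def to_cc_split(external, talk_ratio, absent):
--     if len(external) <= 3:
--         return [(a["name"], a["email"]) for a in external], []
--     to_names = set()
--     for a in absent:
--         to_names.add(a["name"])
--     # one pass tracking the top two attendees by word count; strict '>' keeps
--     # the earliest attendee on ties, matching a stable descending sort's slice
--     best = second = None  # (name, words) pairs
--     for a in external:
--         w = talk_ratio.get(a["name"], {}).get("words", 0)
--         if best is None or w > best[1]:
--             best, second = (a["name"], w), best
--         elif second is None or w > second[1]:
--             second = (a["name"], w)
--     to_names.add(best[0])
--     to_names.add(second[0])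
--     to_list, cc_list = [], []
--     for a in external:
--         (to_list if a["name"] in to_names else cc_list).append((a["name"], a["email"]))
--     return to_list, cc_list
-- ===== Notes on version B (the rewrite author's own statement) =====
-- stated objective: alternative
-- what changed: Replaces the full stable descending sort of external by a single left-to-right top-two scan (strict '>' so ties keep the earliest attendee, matching the stable sort's slice) and builds to_list/cc_list in one pass instead of two comprehensions.
import Mathlib
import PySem

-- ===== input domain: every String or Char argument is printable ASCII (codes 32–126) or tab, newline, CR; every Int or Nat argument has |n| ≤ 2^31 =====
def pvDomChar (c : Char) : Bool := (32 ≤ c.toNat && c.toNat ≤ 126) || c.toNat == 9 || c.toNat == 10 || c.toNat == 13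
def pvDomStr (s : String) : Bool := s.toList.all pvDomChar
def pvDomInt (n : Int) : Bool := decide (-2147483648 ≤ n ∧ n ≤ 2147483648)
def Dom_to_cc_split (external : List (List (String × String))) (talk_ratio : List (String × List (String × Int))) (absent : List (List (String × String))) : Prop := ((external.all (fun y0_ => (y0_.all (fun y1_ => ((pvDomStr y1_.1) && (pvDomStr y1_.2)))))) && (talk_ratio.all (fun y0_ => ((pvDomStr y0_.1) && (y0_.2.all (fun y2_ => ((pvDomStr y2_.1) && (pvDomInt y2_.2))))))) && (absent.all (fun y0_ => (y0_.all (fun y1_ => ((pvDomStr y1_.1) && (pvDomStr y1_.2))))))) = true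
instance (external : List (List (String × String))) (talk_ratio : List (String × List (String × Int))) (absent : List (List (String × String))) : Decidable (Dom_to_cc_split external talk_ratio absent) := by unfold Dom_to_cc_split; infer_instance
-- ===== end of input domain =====

-- B replaces A's full descending sort of `external` by a single left-to-right top-two scan
-- (strict '>' keeps the earliest attendee on ties) and builds to/cc in one pass (objective: alternative).

-- ===== PORT A =====
-- a["name"] / a["email"]: total getD form; Pre_to_cc_split guarantees the keys are present (else Python raises KeyError)
def pvName (a : List (String × String)) : String := PySem.Dict.getD ⟨a⟩ "name" ""
def pvEmail (a : List (String × String)) : String := PySem.Dict.getD ⟨a⟩ "email" ""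
-- talk_ratio.get(a["name"], {}).get("words", 0)
def pvWords (talk_ratio : List (String × List (String × Int))) (a : List (String × String)) : Int :=
  PySem.Dict.getD ⟨PySem.Dict.getD ⟨talk_ratio⟩ (pvName a) []⟩ "words" 0

def to_cc_split (external : List (List (String × String))) (talk_ratio : List (String × List (String × Int))) (absent : List (List (String × String))) : (List (String × String)) × (List (String × String)) :=
  if PySem.List.len external ≤ 3 then
    (external.map (fun a => (pvName a, pvEmail a)), [])
  else
    let to_names : PySem.Set String :=
      absent.foldl (fun s a => PySem.Set.add s (pvName a)) PySem.Set.empty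
    let ranked := PySem.List.sorted external (pvWords talk_ratio) true
    let to_names :=
      (PySem.List.slice ranked none (some 2)).foldl (fun s a => PySem.Set.add s (pvName a)) to_names
    let to_list := (external.filter (fun a => PySem.Set.contains to_names (pvName a))).map
      (fun a => (pvName a, pvEmail a))
    let cc_list := (external.filter (fun a => !PySem.Set.contains to_names (pvName a))).map
      (fun a => (pvName a, pvEmail a))
    (to_list, cc_list)

-- ===== PORT B =====
-- state of B's scan: (best, second) as optional (name, words) pairs
def pvTop2Step (talk_ratio : List (String × List (String × Int)))
    (st : Option (String × Int) × Option (String × Int)) (a : List (String × String)) :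
    Option (String × Int) × Option (String × Int) :=
  let w := pvWords talk_ratio a
  match st with
  | (none, s) => (some (pvName a, w), s)
  | (some (bn, bw), s) =>
    if bw < w then (some (pvName a, w), some (bn, bw))
    else match s with
      | none => (some (bn, bw), some (pvName a, w))
      | some (sn, sw) => if sw < w then (some (bn, bw), some (pvName a, w))
                         else (some (bn, bw), some (sn, sw))

def to_cc_split_alt (external : List (List (String × String))) (talk_ratio : List (String × List (String × Int))) (absent : List (List (String × String))) : (List (String × String)) × (List (String × String)) :=
  if PySem.List.len external ≤ 3 then
    (external.map (fun a => (pvName a, pvEmail a)), [])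
  else
    let to_names : PySem.Set String :=
      absent.foldl (fun s a => PySem.Set.add s (pvName a)) PySem.Set.empty
    let st := external.foldl (pvTop2Step talk_ratio) (none, none)
    let to_names :=
      match st with
      | (some b, some s) => PySem.Set.add (PySem.Set.add to_names b.1) s.1
      | (some b, none) => PySem.Set.add to_names b.1
      | (none, _) => to_names
    external.foldl
      (fun (acc : List (String × String) × List (String × String)) a =>
        if PySem.Set.contains to_names (pvName a) then (acc.1 ++ [(pvName a, pvEmail a)], acc.2)
        else (acc.1, acc.2 ++ [(pvName a, pvEmail a)]))
      ([], [])

-- ===== PRECONDITION & SPEC =====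
-- Pre_ excludes exactly the inputs where Python A raises KeyError: an attendee of `external`
-- missing "name" or "email", or (when the early guard is not taken) an entry of `absent` missing "name".
def Pre_to_cc_split (external : List (List (String × String))) (talk_ratio : List (String × List (String × Int))) (absent : List (List (String × String))) : Prop :=
  (∀ a ∈ external, PySem.Dict.contains ⟨a⟩ "name" = true ∧ PySem.Dict.contains ⟨a⟩ "email" = true) ∧
  (3 < external.length → ∀ a ∈ absent, PySem.Dict.contains ⟨a⟩ "name" = true)
instance (external : List (List (String × String))) (talk_ratio : List (String × List (String × Int))) (absent : List (List (String × String))) : Decidable (Pre_to_cc_split external talk_ratio absent) := by unfold Pre_to_cc_split; infer_instance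
def pvWitness_to_cc_split : (List (List (String × String))) × (List (String × List (String × Int))) × (List (List (String × String))) :=
  ([[("name", "ann"), ("email", "a@x")], [("name", "bob"), ("email", "b@x")]], [("ann", [("words", 7)])], [])

def Spec_to_cc_split (external : List (List (String × String))) (talk_ratio : List (String × List (String × Int))) (absent : List (List (String × String))) (out : (List (String × String)) × (List (String × String))) : Prop := out = to_cc_split_alt external talk_ratio absent
instance (external : List (List (String × String))) (talk_ratio : List (String × List (String × Int))) (absent : List (List (String × String))) (out : (List (String × String)) × (List (String × String))) : Decidable (Spec_to_cc_split external talk_ratio absent out) := by unfold Spec_to_cc_split; infer_instance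

-- ===== CLAIM (what is proved, stated in full; the proofs are below) =====
def Claim_equal_to_cc_split : Prop := ∀ (external : List (List (String × String))) (talk_ratio : List (String × List (String × Int))) (absent : List (List (String × String))), Dom_to_cc_split external talk_ratio absent → Pre_to_cc_split external talk_ratio absent → Spec_to_cc_split external talk_ratio absent (to_cc_split external talk_ratio absent)

-- ===== LEMMAS AND PROOFS =====

-- abstract one-pass top-two step over elements with key `key`
def pvStep2 {α : Type} (key : α → Int) (st : Option α × Option α) (x : α) : Option α × Option α :=
  match st with
  | (none, s) => (some x, s)
  | (some b, s) =>
    if key b < key x then (some x, some b)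
    else match s with
      | none => (some b, some x)
      | some z => if key z < key x then (some b, some x) else (some b, some z)

-- one insertion step changes the first two elements exactly as pvStep2 does
theorem pv_insertBy_take2 {α : Type} (key : α → Int) (x : α) (acc : List α) :
    ((PySem.List.insertBy (fun a b => decide (key b < key a)) x acc)[0]?,
     (PySem.List.insertBy (fun a b => decide (key b < key a)) x acc)[1]?) =
    pvStep2 key (acc[0]?, acc[1]?) x := by
  match acc with
  | [] => simp [PySem.List.insertBy, pvStep2]
  | [y] =>
    simp only [PySem.List.insertBy, pvStep2]
    by_cases h : key y < key x
    · simp [h]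
    · simp [h]
  | y :: z :: ys =>
    simp only [PySem.List.insertBy, pvStep2]
    by_cases h : key y < key x
    · simp [h]
    · by_cases h2 : key z < key x
      · simp [h, h2]
      · simp [h, h2]

-- the first two elements of the insertion-sort fold are computed by the one-pass fold
theorem pv_foldl_insertBy_take2 {α : Type} (key : α → Int) (xs : List α) (acc : List α) :
    ((xs.foldl (fun acc x => PySem.List.insertBy (fun a b => decide (key b < key a)) x acc) acc)[0]?,
     (xs.foldl (fun acc x => PySem.List.insertBy (fun a b => decide (key b < key a)) x acc) acc)[1]?) =
    xs.foldl (pvStep2 key) (acc[0]?, acc[1]?) := by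
  induction xs generalizing acc with
  | nil => rfl
  | cons x xs ih =>
    simp only [List.foldl_cons]
    rw [ih, ← pv_insertBy_take2]

-- B's scan is the abstract scan with each element replaced by its (name, words) pair
theorem pv_top2_eq_step2 (talk_ratio : List (String × List (String × Int)))
    (xs : List (List (String × String))) (st : Option (List (String × String)) × Option (List (String × String))) :
    xs.foldl (pvTop2Step talk_ratio)
      (st.1.map (fun a => (pvName a, pvWords talk_ratio a)), st.2.map (fun a => (pvName a, pvWords talk_ratio a))) =
    ((xs.foldl (pvStep2 (pvWords talk_ratio)) st).1.map (fun a => (pvName a, pvWords talk_ratio a)),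
     (xs.foldl (pvStep2 (pvWords talk_ratio)) st).2.map (fun a => (pvName a, pvWords talk_ratio a))) := by
  induction xs generalizing st with
  | nil => rfl
  | cons x xs ih =>
    simp only [List.foldl_cons]
    rw [← ih]
    congr 1
    obtain ⟨b, s⟩ := st
    match b, s with
    | none, s => rfl
    | some b, none =>
      simp only [pvTop2Step, pvStep2, Option.map_some, Option.map_none]
      split_ifs <;> rfl
    | some b, some z =>
      simp only [pvTop2Step, pvStep2, Option.map_some]
      split_ifs <;> rfl

theorem to_cc_split_eq (external : List (List (String × String))) (talk_ratio : List (String × List (String × Int))) (absent : List (List (String × String))) :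
    to_cc_split external talk_ratio absent = to_cc_split_alt external talk_ratio absent := by
  unfold to_cc_split to_cc_split_alt
  by_cases hle : PySem.List.len external ≤ 3
  · rw [if_pos hle, if_pos hle]
  · rw [if_neg hle, if_neg hle]
    have hlen : 3 < external.length := by
      simp [PySem.List.len_eq] at hle; omega
    obtain ⟨r0, r1, rest, hr⟩ : ∃ r0 r1 rest,
        PySem.List.sorted external (pvWords talk_ratio) true = r0 :: r1 :: rest := by
      have hrlen := PySem.List.length_sorted external (pvWords talk_ratio) true
      match h : PySem.List.sorted external (pvWords talk_ratio) true with
      | [] => rw [h] at hrlen; simp at hrlen; omega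
      | [a] => rw [h] at hrlen; simp at hrlen; omega
      | a :: b :: t => exact ⟨a, b, t, rfl⟩
    -- B's scan state = (some r0, some r1) up to the (name, words) projection
    have hst : external.foldl (pvTop2Step talk_ratio) (none, none) =
        (some (pvName r0, pvWords talk_ratio r0), some (pvName r1, pvWords talk_ratio r1)) := by
      have h1 := pv_top2_eq_step2 talk_ratio external (none, none)
      simp only [Option.map_none] at h1
      have h4 : external.foldl (pvStep2 (pvWords talk_ratio)) (none, none) = (some r0, some r1) := by
        have h2 := pv_foldl_insertBy_take2 (pvWords talk_ratio) external []
        rw [show external.foldl (fun acc x => PySem.List.insertBy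
              (fun a b => decide (pvWords talk_ratio b < pvWords talk_ratio a)) x acc) [] =
            PySem.List.sorted external (pvWords talk_ratio) true from
          (PySem.List.sorted_rev_eq_foldl_insertBy external (pvWords talk_ratio)).symm, hr] at h2
        simpa using h2.symm
      rw [h1, h4]; rfl
    -- A's ranked[:2] is [r0, r1]
    have hslice : PySem.List.slice (PySem.List.sorted external (pvWords talk_ratio) true) none (some 2)
        = [r0, r1] := by
      rw [PySem.List.slice_to _ (by norm_num), hr]
      rfl
    simp only [hst, hslice, List.foldl_cons, List.foldl_nil]
    -- both sides now use the identical name set tn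
    have hout : ∀ (tn : PySem.Set String), external.foldl
        (fun (acc : List (String × String) × List (String × String)) a =>
          if PySem.Set.contains tn (pvName a) then (acc.1 ++ [(pvName a, pvEmail a)], acc.2)
          else (acc.1, acc.2 ++ [(pvName a, pvEmail a)])) ([], []) =
        ((external.filter (fun a => PySem.Set.contains tn (pvName a))).map (fun a => (pvName a, pvEmail a)),
         (external.filter (fun a => !PySem.Set.contains tn (pvName a))).map (fun a => (pvName a, pvEmail a))) := by
      intro tn
      have hsplit : external.foldl
          (fun (acc : List (String × String) × List (String × String)) a =>
            if PySem.Set.contains tn (pvName a) then (acc.1 ++ [(pvName a, pvEmail a)], acc.2)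
            else (acc.1, acc.2 ++ [(pvName a, pvEmail a)])) ([], []) =
          external.foldl (fun (acc : List (String × String) × List (String × String)) a =>
            ((if PySem.Set.contains tn (pvName a) then acc.1 ++ [(pvName a, pvEmail a)] else acc.1),
             (if !PySem.Set.contains tn (pvName a) then acc.2 ++ [(pvName a, pvEmail a)] else acc.2))) ([], []) := by
        apply PySem.List.foldl_congr_mem
        intro acc x _
        by_cases h : pvName x ∈ tn <;> simp [h]
      rw [hsplit,
        PySem.List.foldl_prod_mk
          (f := fun acc x => if PySem.Set.contains tn (pvName x) then acc ++ [(pvName x, pvEmail x)] else acc)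
          (g := fun acc x => if !PySem.Set.contains tn (pvName x) then acc ++ [(pvName x, pvEmail x)] else acc),
        PySem.List.foldl_append_if, PySem.List.foldl_append_if]
      simp
    rw [hout]

-- ===== VERDICT (by name: the statement is the Claim_ definition above) =====
theorem to_cc_split_spec : Claim_equal_to_cc_split := by
  intro external talk_ratio absent _ _
  unfold Spec_to_cc_split
  exact to_cc_split_eq external talk_ratio absent
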